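-- pv_equiv track=rewrite | github.com/airas-org/airas | src/airas/features/retrieve/nodes/get_paper_title_from_airas_db.py | _apply_filters_by_queries
-- ===== SOURCE A (Python) =====
-- from typing import Any
--
-- def _apply_filters_by_queries(
--     papers: list[dict[str, Any]], queries: list[str]
-- ) -> list[dict[str, Any]]:
--     active_queries = [q.lower() for q in queries if q and not q.isspace()]
--
--     if not active_queries:
--         return papers
--
--     filtered_list = []
--     for paper in papers:
--         searchable_text = " ".join(
--             [
--                 paper.get("title", ""),
--                 # paper.get("abstract", ""),
--                 # " ".join(paper.get("authors", [])),
--                 # paper.get("topic", "")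
--             ]
--         ).lower()
--
--         if all(query in searchable_text for query in active_queries):
--             filtered_list.append(paper)
--
--     return filtered_list
-- ===== SOURCE B (Python) =====
-- def _apply_filters_by_queries(papers, queries):
--     active = [q.lower() for q in queries if q and not q.isspace()]
--     if not active:
--         return papers
--     cands = [(" ".join([p.get("title", "")]).lower(), p) for p in papers]
--     for q in active:
--         cands = [(t, p) for (t, p) in cands if q in t]
--     return [p for (t, p) in cands]
-- ===== Notes on version B (the rewrite author's own statement) =====
-- stated objective: alternative
-- what changed: Instead of one pass over papers testing every query with an inner all(), B builds a (lowered_text, paper) candidate table once, narrows it by one filtering pass per active query, and projects the papers back out, so the searchable text is computed in a separate staged pass and the inner all() disappears.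
import Mathlib
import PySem

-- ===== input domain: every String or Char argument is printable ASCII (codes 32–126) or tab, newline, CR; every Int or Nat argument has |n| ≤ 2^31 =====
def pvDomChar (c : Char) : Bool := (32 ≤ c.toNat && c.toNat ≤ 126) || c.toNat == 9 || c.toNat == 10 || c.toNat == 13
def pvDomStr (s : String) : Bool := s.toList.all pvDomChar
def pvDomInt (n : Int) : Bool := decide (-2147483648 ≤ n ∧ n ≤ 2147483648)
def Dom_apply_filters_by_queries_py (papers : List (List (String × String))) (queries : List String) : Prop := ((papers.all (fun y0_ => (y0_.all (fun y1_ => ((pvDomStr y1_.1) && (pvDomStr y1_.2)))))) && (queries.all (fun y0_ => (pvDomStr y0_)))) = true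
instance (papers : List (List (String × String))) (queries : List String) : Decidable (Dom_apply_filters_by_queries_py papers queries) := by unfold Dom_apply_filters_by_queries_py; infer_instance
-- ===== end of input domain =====

-- B builds a (lowered_text, paper) candidate table once, narrows it per query, then projects; same cost, different decomposition.
-- ===== PORT A =====
-- A-side helpers: the list-comprehension for active queries and the searchable text
def aActiveQueries (queries : List String) : List String :=
  (queries.filter (fun q => !(q == "") && !(PySem.Str.strIsspace q))).map PySem.Str.lower

def aSearchableText (paper : List (String × String)) : String :=
  PySem.Str.lower (PySem.Str.join " " [(PySem.Dict.mk paper).getD "title" ""])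

def apply_filters_by_queries_py (papers : List (List (String × String))) (queries : List String) : List (List (String × String)) :=
  let active_queries := aActiveQueries queries
  if active_queries = [] then papers
  else
    papers.foldl (fun filtered_list paper =>
      if active_queries.all (fun query => PySem.Str.isIn query (aSearchableText paper)) then
        filtered_list ++ [paper]
      else filtered_list) []

-- ===== PORT B =====
def apply_filters_by_queries_py_alt (papers : List (List (String × String))) (queries : List String) : List (List (String × String)) :=
  let active := (queries.filter (fun q => !(q == "") && !(PySem.Str.strIsspace q))).map PySem.Str.lower
  if active = [] then papers
  else
    let cands := papers.map (fun p =>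
      (PySem.Str.lower (PySem.Str.join " " [(PySem.Dict.mk p).getD "title" ""]), p))
    let narrowed := active.foldl (fun cs q => cs.filter (fun tp => PySem.Str.isIn q tp.1)) cands
    narrowed.map (fun tp => tp.2)

-- ===== PRECONDITION & SPEC =====
def Spec_apply_filters_by_queries_py (papers : List (List (String × String))) (queries : List String) (out : List (List (String × String))) : Prop := out = apply_filters_by_queries_py_alt papers queries
instance (papers : List (List (String × String))) (queries : List String) (out : List (List (String × String))) : Decidable (Spec_apply_filters_by_queries_py papers queries out) := by unfold Spec_apply_filters_by_queries_py; infer_instance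

-- ===== CLAIM (what is proved, stated in full; the proofs are below) =====
def Claim_equal_apply_filters_by_queries_py : Prop := ∀ (papers : List (List (String × String))) (queries : List String), Dom_apply_filters_by_queries_py papers queries → Spec_apply_filters_by_queries_py papers queries (apply_filters_by_queries_py papers queries)

-- ===== LEMMAS AND PROOFS =====
theorem pv_narrow_eq_filter_all (f : (String × List (String × String)) → String)
    (qs : List String) (cs : List (String × List (String × String))) :
    qs.foldl (fun cs q => cs.filter (fun tp => PySem.Str.isIn q (f tp))) cs
      = cs.filter (fun tp => qs.all (fun q => PySem.Str.isIn q (f tp))) := by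
  induction qs generalizing cs with
  | nil => simp
  | cons q qs ih =>
    simp only [List.foldl_cons, ih, List.filter_filter, List.all_cons]
    exact List.filter_congr (fun tp _ => by rw [Bool.and_comm])

-- ===== VERDICT (by name: the statement is the Claim_ definition above) =====
theorem apply_filters_by_queries_py_spec : Claim_equal_apply_filters_by_queries_py := by
  intro papers queries _
  unfold Spec_apply_filters_by_queries_py apply_filters_by_queries_py apply_filters_by_queries_py_alt
  have h' : ((queries.filter (fun q => !(q == "") && !(PySem.Str.strIsspace q))).map PySem.Str.lower) = aActiveQueries queries := rfl
  rw [h']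
  by_cases h : aActiveQueries queries = []
  · simp [h]
  · simp only [if_neg h, pv_narrow_eq_filter_all (fun tp => tp.1),
      PySem.List.foldl_append_if_eq_filter, List.nil_append, List.filter_map, List.map_map,
      Function.comp_def, List.map_id']
    simp [aSearchableText]
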